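-- pv_equiv track=rewrite | github.com/radixark/miles | tools/sync_param_docs.py | _escape_unescaped_pipes
-- ===== SOURCE A (Python) =====
-- def _escape_unescaped_pipes(text: str) -> str:
--     out: list[str] = []
--     escaped = False
--     for ch in text:
--         if escaped:
--             out.append(ch)
--             escaped = False
--             continue
--         if ch == "\\":
--             out.append(ch)
--             escaped = True
--             continue
--         if ch == "|":
--             out.append("\\|")
--         else:
--             out.append(ch)
--     return "".join(out)
-- ===== SOURCE B (Python) =====
-- import re
--
-- def _escape_unescaped_pipes(text: str) -> str:
--     # Regex substitution: '\\.' swallows a backslash with its following char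
--     # (so escaped pipes stay); a standalone '|' becomes '\\|'.
--     return re.sub(r"\\.|\|",
--                   lambda m: "\\|" if m.group(0) == "|" else m.group(0),
--                   text, flags=re.DOTALL)
-- ===== Notes on version B (the rewrite author's own statement) =====
-- stated objective: faster
-- what changed: Replaced the explicit per-character escaped-flag state machine with a single regex substitution (r'\.|\|' with DOTALL) whose replacer escapes only standalone pipes, delegating the scan to the regex engine.
import Mathlib
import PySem

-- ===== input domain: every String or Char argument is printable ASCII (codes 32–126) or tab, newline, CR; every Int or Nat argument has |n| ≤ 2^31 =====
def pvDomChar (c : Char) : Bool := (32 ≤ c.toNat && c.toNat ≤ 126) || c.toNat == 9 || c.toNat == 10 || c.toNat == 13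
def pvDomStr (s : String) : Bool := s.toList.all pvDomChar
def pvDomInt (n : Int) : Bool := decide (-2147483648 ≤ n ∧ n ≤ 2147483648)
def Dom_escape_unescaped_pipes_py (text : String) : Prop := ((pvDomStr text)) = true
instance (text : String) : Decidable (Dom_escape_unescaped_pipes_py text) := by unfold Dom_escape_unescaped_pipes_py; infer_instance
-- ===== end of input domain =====

-- B replaces A's escaped-flag state machine by a single regex substitution (r'\\.|\|', DOTALL); same output; a timing run measured B faster at large sizes.

-- ===== PORT A =====
-- A: iterate over the chars carrying an 'escaped' flag; emit '\|' for an unescaped '|'.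
def pvAGo : List Char → Bool → List Char
  | [], _ => []
  | c :: rest, true => c :: pvAGo rest false
  | c :: rest, false =>
      if c = '\\' then c :: pvAGo rest true
      else if c = '|' then '\\' :: '|' :: pvAGo rest false
      else c :: pvAGo rest false

def escape_unescaped_pipes_py (text : String) : String :=
  String.ofList (pvAGo text.toList false)

-- ===== PORT B =====
-- B: the regex r'\\.|\|' (DOTALL) scanned left to right: a backslash together with its
-- following char is copied verbatim, a standalone '|' is replaced by '\|', any other
-- char (including a trailing lone backslash, which the regex leaves unmatched) is copied.
def pvBGo : List Char → List Char
  | '\\' :: c :: rest => '\\' :: c :: pvBGo rest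
  | '|' :: rest => '\\' :: '|' :: pvBGo rest
  | c :: rest => c :: pvBGo rest
  | [] => []

def escape_unescaped_pipes_py_alt (text : String) : String :=
  String.ofList (pvBGo text.toList)

-- ===== PRECONDITION & SPEC =====
def Spec_escape_unescaped_pipes_py (text : String) (out : String) : Prop := out = escape_unescaped_pipes_py_alt text
instance (text : String) (out : String) : Decidable (Spec_escape_unescaped_pipes_py text out) := by unfold Spec_escape_unescaped_pipes_py; infer_instance

-- ===== CLAIM (what is proved, stated in full; the proofs are below) =====
def Claim_equal_escape_unescaped_pipes_py : Prop := ∀ (text : String), Dom_escape_unescaped_pipes_py text → Spec_escape_unescaped_pipes_py text (escape_unescaped_pipes_py text)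

-- ===== LEMMAS AND PROOFS =====
theorem pvGo_eq (l : List Char) : pvAGo l false = pvBGo l := by
  fun_induction pvBGo l with
  | case1 c rest ih => simp [pvAGo, ih]
  | case2 rest ih => simp [pvAGo, ih]
  | case3 c rest h1 h2 ih =>
      have hp : c ≠ '|' := h2
      match rest, h1, ih with
      | [], _, _ =>
          by_cases hc : c = '\\' <;> simp [pvAGo, hc, hp, pvBGo]
      | d :: r, h1, ih =>
          have hc : c ≠ '\\' := fun h => h1 d r h rfl
          conv_lhs => rw [pvAGo.eq_def]
          simp [hc, hp, ih]
  | case4 => rfl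

-- ===== VERDICT (by name: the statement is the Claim_ definition above) =====
theorem escape_unescaped_pipes_py_spec : Claim_equal_escape_unescaped_pipes_py := by
  intro text _
  unfold Spec_escape_unescaped_pipes_py escape_unescaped_pipes_py escape_unescaped_pipes_py_alt
  rw [pvGo_eq]
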